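-- pv_equiv track=rewrite | github.com/42lan/snow-crash | f.py | ft_des
-- ===== SOURCE A (Python) =====
-- _secret = "0123456"
--
-- def ft_des(message):
--     strdup = [ord(code) for code in message]
--     _0x18 = 0x00
--     _0x1C = 0x00
--     while (len(strdup) > _0x1C):
--         if (_0x18 == 0x06):
--             _0x18 = 0x00
--         if (not (_0x1C & 0x01)):
--             _0x10 = 0x00
--             while (ord(_secret[_0x18]) > _0x10):
--                 strdup[_0x1C] -= 0x01
--                 if (strdup[_0x1C] == 0x1F):
--                     strdup[_0x1C] = 0x7E
--                 _0x10 += 0x01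
--         else:
--             _0x14 = 0x00
--             while (ord(_secret[_0x18]) > _0x14):
--                 strdup[_0x1C] += 0x01
--                 if (strdup[_0x1C] == 0x7f):
--                       strdup[_0x1C] = 0x20
--                 _0x14 += 0x01
--         _0x1C += 0x01
--         _0x18 += 0x01
--     return ("".join([chr(code) for code in strdup]))
-- ===== SOURCE B (Python) =====
-- def _shift(i, c):
--     s = 48 + i % 6
--     d = s if i % 2 else -s
--     return chr(32 + (ord(c) + d - 32) % 95)
--
-- def ft_des(message):
--     return "".join(_shift(i, c) for i, c in enumerate(message))
-- ===== Notes on version B (the rewrite author's own statement) =====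
-- stated objective: faster
-- what changed: Replaces the per-character unit-step wraparound loops (48-53 decrements/increments each) by one closed-form modular shift 32 + (ord(c) +/- (48 + i%6) - 32) % 95 per character.
-- crash fix: On messages with a tab/newline/CR at an even index A raises ValueError (chr of a negative code after subtracting the key); B returns the closed-form shifted character there. — e.g. on ft_des("\t"): A raises ValueError, B returns "8"
import Mathlib
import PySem

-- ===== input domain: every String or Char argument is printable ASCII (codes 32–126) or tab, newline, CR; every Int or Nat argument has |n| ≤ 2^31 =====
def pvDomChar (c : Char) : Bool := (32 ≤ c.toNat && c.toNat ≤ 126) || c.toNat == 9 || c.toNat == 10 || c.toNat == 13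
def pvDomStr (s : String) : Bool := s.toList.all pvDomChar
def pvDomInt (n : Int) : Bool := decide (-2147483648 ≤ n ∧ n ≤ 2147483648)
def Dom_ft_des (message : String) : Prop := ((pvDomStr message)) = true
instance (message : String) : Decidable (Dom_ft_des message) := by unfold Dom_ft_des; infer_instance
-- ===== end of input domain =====

-- B replaces A's per-character unit-step wraparound loops by one closed-form modular
-- shift per character (objective: faster by a constant factor).

-- ===== PORT A =====
-- inner `while` of the even branch: decrement with wrap 0x1F -> 0x7E, run `fuel` times
def pvDecLoop (v : Int) : Nat → Int
  | 0 => v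
  | n + 1 => pvDecLoop (if v - 1 = 0x1F then 0x7E else v - 1) n

-- inner `while` of the odd branch: increment with wrap 0x7F -> 0x20, run `fuel` times
def pvIncLoop (v : Int) : Nat → Int
  | 0 => v
  | n + 1 => pvIncLoop (if v + 1 = 0x7F then 0x20 else v + 1) n

-- the outer `while`: one step per list element; key = _0x18, idx = _0x1C
def ft_desGo : List Int → Nat → Nat → List Int
  | [], _, _ => []
  | v :: rest, key, idx =>
    let key' := if key = 6 then 0 else key
    -- ord(_secret[_0x18]); on reachable states key' < 6 so pyGet? is `some`; the ' ' default is dead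
    let s : Int := (((PySem.Str.pyGet? "0123456" (key' : Int)).getD ' ').toNat : Int)
    -- each inner while loop runs exactly s times (counter 0,1,…; condition s > counter)
    let v' := if idx % 2 = 0 then pvDecLoop v s.toNat else pvIncLoop v s.toNat
    v' :: ft_desGo rest (key' + 1) (idx + 1)

def ft_des (message : String) : String :=
  -- chr(code) raises ValueError for negative codes; Pre_ft_des excludes exactly those inputs
  String.mk ((ft_desGo (message.toList.map (fun c => (c.toNat : Int))) 0 0).map
    (fun v => Char.ofNat v.toNat))

-- ===== PORT B =====
def ft_desShift (i : Int) (c : Char) : Char :=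
  let s : Int := 48 + PySem.Int.mod i 6
  let d : Int := if PySem.Int.mod i 2 = 0 then -s else s
  Char.ofNat (32 + PySem.Int.mod ((c.toNat : Int) + d - 32) 95).toNat

def ft_des_alt (message : String) : String :=
  String.mk ((PySem.List.enumerate message.toList 0).map (fun p => ft_desShift p.1 p.2))

-- ===== PRECONDITION & SPEC =====
-- Pre_ excludes messages with a control character (code < 32) at an even index:
-- there A's subtraction drives the code negative and chr raises ValueError.
def Pre_ft_des (message : String) : Prop :=
  ∀ p ∈ PySem.List.enumerate message.toList 0, p.1 % 2 = 0 → 32 ≤ p.2.toNat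

instance (message : String) : Decidable (Pre_ft_des message) := by unfold Pre_ft_des; infer_instance

def pvWitness_ft_des : String := "Hi there"

-- On messages with a tab/newline/CR at an even index A raises ValueError; B returns the shifted character.
def Raises_ft_des (message : String) : Prop :=
  ∃ p ∈ PySem.List.enumerate message.toList 0, p.1 % 2 = 0 ∧ p.2.toNat < 32

instance (message : String) : Decidable (Raises_ft_des message) := by unfold Raises_ft_des; infer_instance

def pvRaiseWitness_ft_des : String := "\t"
def pvRaiseWitnessOut_ft_des : String := "8"

def Spec_ft_des (message : String) (out : String) : Prop := out = ft_des_alt message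
instance (message : String) (out : String) : Decidable (Spec_ft_des message out) := by unfold Spec_ft_des; infer_instance

-- ===== CLAIM (what is proved, stated in full; the proofs are below) =====
def Claim_equal_ft_des : Prop := ∀ (message : String), Dom_ft_des message → Pre_ft_des message → Spec_ft_des message (ft_des message)

def Claim_raises_ft_des : Prop := (∀ (message : String), Dom_ft_des message → Raises_ft_des message → ¬ Pre_ft_des message) ∧ (Dom_ft_des (pvRaiseWitness_ft_des) ∧ Raises_ft_des (pvRaiseWitness_ft_des) ∧ ft_des_alt (pvRaiseWitness_ft_des) = pvRaiseWitnessOut_ft_des)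

-- ===== LEMMAS AND PROOFS =====

-- closed form of the decrementing inner loop on the printable range
theorem pvDecLoop_closed : ∀ (n : Nat) (v : Int), 32 ≤ v → v ≤ 126 →
    pvDecLoop v n = 32 + (v - 32 - n) % 95 := by
  intro n
  induction n with
  | zero => intro v h1 h2; simp only [pvDecLoop, Nat.cast_zero]; omega
  | succ m ih =>
    intro v h1 h2
    show pvDecLoop (if v - 1 = 0x1F then 0x7E else v - 1) m = _
    by_cases h : v - 1 = 0x1F
    · rw [if_pos h, ih 126 (by omega) (by omega)]; omega
    · rw [if_neg h, ih (v - 1) (by omega) (by omega)]; omega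

-- closed form of the incrementing inner loop on the printable range
theorem pvIncLoop_closed : ∀ (n : Nat) (v : Int), 32 ≤ v → v ≤ 126 →
    pvIncLoop v n = 32 + (v - 32 + n) % 95 := by
  intro n
  induction n with
  | zero => intro v h1 h2; simp only [pvIncLoop, Nat.cast_zero]; omega
  | succ m ih =>
    intro v h1 h2
    show pvIncLoop (if v + 1 = 0x7F then 0x20 else v + 1) m = _
    by_cases h : v + 1 = 0x7F
    · rw [if_pos h, ih 32 (by omega) (by omega)]; omega
    · rw [if_neg h, ih (v + 1) (by omega) (by omega)]; omega

-- the incrementing inner loop never wraps while it stays below 127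
theorem pvIncLoop_no_wrap : ∀ (n : Nat) (v : Int), v + n ≤ 126 →
    pvIncLoop v n = v + n := by
  intro n
  induction n with
  | zero => intro v _; simp [pvIncLoop]
  | succ m ih =>
    intro v h
    show pvIncLoop (if v + 1 = 0x7F then 0x20 else v + 1) m = _
    rw [if_neg (by omega), ih (v + 1) (by omega)]; omega

-- ord(_secret[k]) = 48 + k for k < 6
theorem secret_ord (k : Nat) (hk : k < 6) :
    ((((PySem.Str.pyGet? "0123456" (k : Int)).getD ' ').toNat : Int)) = 48 + k := by
  interval_cases k <;> decide

theorem char_roundtrip (n : Nat) (h : n < 55296) : (Char.ofNat n).toNat = n := by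
  rw [Char.toNat_ofNat, if_pos (Or.inl h)]

-- main loop invariant: with key ≡ idx (mod 6), A's loop computes B's closed form pointwise
theorem go_spec : ∀ (l : List Char) (i k : Nat),
    k ≤ 6 → (if k = 6 then 0 else k) = i % 6 →
    (∀ c ∈ l, pvDomChar c = true) →
    (∀ p ∈ PySem.List.enumerate l (i : Int), p.1 % 2 = 0 → 32 ≤ p.2.toNat) →
    ft_desGo (l.map (fun c => (c.toNat : Int))) k i
      = (PySem.List.enumerate l (i : Int)).map
          (fun p => ((ft_desShift p.1 p.2).toNat : Int)) := by
  intro l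
  induction l with
  | nil => intro i k _ _ _ _; simp [ft_desGo, PySem.List.enumerate_nil]
  | cons c rest ih =>
    intro i k hk hinv hdom hpre
    rw [PySem.List.enumerate_cons]
    simp only [List.map_cons, ft_desGo]
    rw [hinv, secret_ord (i % 6) (Nat.mod_lt _ (by norm_num))]
    have hcast : ((48 : Int) + ((i % 6 : Nat) : Int)).toNat = 48 + i % 6 := by omega
    rw [hcast, List.cons_eq_cons]
    have hc : pvDomChar c = true := hdom c (List.mem_cons_self ..)
    have hcr : 32 ≤ c.toNat ∧ c.toNat ≤ 126 ∨ c.toNat = 9 ∨ c.toNat = 10 ∨ c.toNat = 13 := by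
      simp [pvDomChar] at hc; omega
    have hmem : ((i : Int), c) ∈ PySem.List.enumerate (c :: rest) (i : Int) := by
      rw [PySem.List.enumerate_cons]; exact List.mem_cons_self ..
    constructor
    · -- head: one character
      simp only [ft_desShift,
        PySem.Int.mod_eq_emod_of_pos (b := 6) (by norm_num),
        PySem.Int.mod_eq_emod_of_pos (b := 2) (by norm_num),
        PySem.Int.mod_eq_emod_of_pos (b := 95) (by norm_num)]
      have hi6 : ((i : Int)) % 6 = ((i % 6 : Nat) : Int) := by omega
      rw [hi6]
      by_cases hpar : i % 2 = 0
      · -- even index: Pre_ guarantees a printable character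
        have h32 : 32 ≤ c.toNat := hpre _ hmem (by omega)
        have h126 : c.toNat ≤ 126 := by omega
        rw [if_pos hpar, if_pos (by omega : ((i : Int)) % 2 = 0),
            pvDecLoop_closed _ _ (by omega) (by omega),
            char_roundtrip _ (by omega)]
        omega
      · rw [if_neg hpar, if_neg (by omega : ¬ ((i : Int)) % 2 = 0)]
        rcases hcr with ⟨h1, h2⟩ | hlow
        · rw [pvIncLoop_closed _ _ (by omega) (by omega), char_roundtrip _ (by omega)]
          omega
        · -- tab/newline/CR at an odd index: the loop never wraps and the mod is trivial
          rw [pvIncLoop_no_wrap _ _ (by omega), char_roundtrip _ (by omega)]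
          omega
    · -- tail: apply the induction hypothesis at index i+1
      have hstep : ((i : Int) + 1) = ((i + 1 : Nat) : Int) := by push_cast; ring
      rw [hstep]
      exact ih (i + 1) (i % 6 + 1) (by omega) (by split_ifs with h <;> omega)
        (fun c hc => hdom c (List.mem_cons_of_mem _ hc))
        (by intro p hp hpe
            refine hpre p ?_ hpe
            rw [PySem.List.enumerate_cons, hstep]
            exact List.mem_cons_of_mem _ hp)

-- ===== VERDICT (by name: the statement is the Claim_ definition above) =====
theorem ft_des_spec : Claim_equal_ft_des := by
  intro message hdom hpre
  unfold Spec_ft_des ft_des ft_des_alt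
  have hdom' : ∀ c ∈ message.toList, pvDomChar c = true := by
    intro c hc
    exact List.all_eq_true.mp hdom c hc
  rw [show ((0 : Int) = ((0 : Nat) : Int)) by norm_num] at *
  rw [go_spec message.toList 0 0 (by omega) (by decide) hdom' (by exact_mod_cast hpre)]
  rw [List.map_map]
  congr 1
  apply List.map_congr_left
  intro p _
  simp [Int.toNat_natCast, Char.ofNat_toNat]

@[simp] theorem ft_des_raises : Claim_raises_ft_des := by
  unfold Claim_raises_ft_des
  constructor
  · rintro message _ ⟨p, hp, he, hlt⟩ hpre
    exact absurd (hpre p hp he) (by omega)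
  · refine ⟨by decide, ⟨(0, '\t'), ?_, by decide, by decide⟩, by decide⟩
    show (0, '\t') ∈ PySem.List.enumerate "\t".toList 0
    simp [PySem.List.enumerate_cons]
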